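-- pv_equiv track=rewrite | github.com/Dmitriy-Bondarev/TimeWoven | app/api/routes/tree.py | _group_own_memories_by_year
-- ===== SOURCE A (Python) =====
-- def _group_own_memories_by_year(rows: list[dict]) -> list[tuple[str, list[dict]]]:
--     from collections import defaultdict
--
--     buck: dict[str, list[dict]] = defaultdict(list)
--     for d in rows:
--         yk = d.get("year_key") or "—"
--         buck[yk].append(d)
--     years = list(buck.keys())
--
--     def _yk_sort(y: str) -> tuple:
--         if y.isdigit():
--             return (0, -int(y))
--         return (1, 0)
--
--     years.sort(key=_yk_sort)
--     return [(y, buck[y]) for y in years]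
-- ===== SOURCE B (Python) =====
-- def _group_own_memories_by_year(rows):
--     def key(d):
--         return d.get("year_key") or "—"
--
--     seen = []
--     for d in rows:
--         yk = key(d)
--         if yk not in seen:
--             seen.append(yk)
--     digits = sorted((y for y in seen if y.isdigit()), key=lambda y: -int(y))
--     others = [y for y in seen if not y.isdigit()]
--     return [(y, [d for d in rows if key(d) == y]) for y in digits + others]
-- ===== Notes on version B (the rewrite author's own statement) =====
-- stated objective: alternative
-- what changed: Replaces the defaultdict bucketing plus tuple-key sort of the key list by a first-appearance key scan, a partition into digit and non-digit keys with one numeric descending sort, and a per-key filter over the rows to build each group.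
import Mathlib
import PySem

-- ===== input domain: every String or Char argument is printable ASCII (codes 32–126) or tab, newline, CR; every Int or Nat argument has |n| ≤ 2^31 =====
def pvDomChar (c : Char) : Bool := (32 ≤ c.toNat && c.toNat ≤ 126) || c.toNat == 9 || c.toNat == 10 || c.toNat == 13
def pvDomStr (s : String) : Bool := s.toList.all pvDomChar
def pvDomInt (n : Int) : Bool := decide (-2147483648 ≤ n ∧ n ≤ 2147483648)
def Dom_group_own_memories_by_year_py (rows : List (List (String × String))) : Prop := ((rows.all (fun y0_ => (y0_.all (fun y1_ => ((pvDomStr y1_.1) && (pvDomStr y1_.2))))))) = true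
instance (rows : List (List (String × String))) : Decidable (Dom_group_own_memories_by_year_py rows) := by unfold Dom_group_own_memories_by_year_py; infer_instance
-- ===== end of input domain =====

-- B replaces A's defaultdict buckets + tuple-key sort by a first-appearance key scan, a
-- partition into digit/non-digit keys with one numeric descending sort, and per-key filters
-- over the rows (objective: alternative decomposition, not faster).

-- Shared getter (both Pythons compute `d.get("year_key") or "—"`): first-match lookup;
-- the only falsy str is "".
def pvYearKey (d : List (String × String)) : String :=
  match List.lookup "year_key" d with
  | some v => if v = "" then "—" else v
  | none => "—"

-- ===== PORT A =====
def group_own_memories_by_year_py (rows : List (List (String × String))) : List (String × (List (List (String × String)))) :=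
  -- buck[yk].append(d) on a defaultdict(list)
  let buck : PySem.Dict String (List (List (String × String))) :=
    rows.foldl (fun b d => b.modify (pvYearKey d) [] (fun l => l ++ [d])) PySem.Dict.empty
  let years := buck.keys
  -- years.sort(key=_yk_sort) with the tuple key (0, -int(y)) / (1, 0); int(y) under the
  -- isdigit guard is exact as (ofStr? y).getD 0 (ofStr? is some on digit-only strings)
  let sortedYears := PySem.List.sorted2 years
    (fun y => if PySem.Str.strIsdigit y then (0 : Int) else 1)
    (fun y => if PySem.Str.strIsdigit y then -((PySem.Int.ofStr? y).getD 0) else 0)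
  -- buck[y]: y is always a key of buck here, so getD is exact (no KeyError possible)
  sortedYears.map (fun y => (y, buck.getD y []))

-- ===== PORT B =====
def group_own_memories_by_year_py_alt (rows : List (List (String × String))) : List (String × (List (List (String × String)))) :=
  -- seen: distinct year keys in first-appearance order
  let seen : PySem.Set String := rows.foldl (fun s d => PySem.Set.add s (pvYearKey d)) []
  let digits := PySem.List.sorted (seen.filter (fun y => PySem.Str.strIsdigit y))
    (fun y => -((PySem.Int.ofStr? y).getD 0))
  let others := seen.filter (fun y => !PySem.Str.strIsdigit y)
  (digits ++ others).map (fun y => (y, rows.filter (fun d => pvYearKey d == y)))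

-- ===== PRECONDITION & SPEC =====
def Spec_group_own_memories_by_year_py (rows : List (List (String × String))) (out : List (String × (List (List (String × String))))) : Prop := out = group_own_memories_by_year_py_alt rows
instance (rows : List (List (String × String))) (out : List (String × (List (List (String × String))))) : Decidable (Spec_group_own_memories_by_year_py rows out) := by unfold Spec_group_own_memories_by_year_py; infer_instance

-- ===== CLAIM (what is proved, stated in full; the proofs are below) =====
def Claim_equal_group_own_memories_by_year_py : Prop := ∀ (rows : List (List (String × String))), Dom_group_own_memories_by_year_py rows → Spec_group_own_memories_by_year_py rows (group_own_memories_by_year_py rows)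

-- ===== LEMMAS AND PROOFS =====

-- the comparison sorted2 uses in port A, and the one sorted uses in port B
def pvK1 (y : String) : Int := if PySem.Str.strIsdigit y then 0 else 1
def pvK2 (y : String) : Int := if PySem.Str.strIsdigit y then -((PySem.Int.ofStr? y).getD 0) else 0
def pvB2 (a b : String) : Bool :=
  decide (pvK1 a < pvK1 b) || (!decide (pvK1 b < pvK1 a) && decide (pvK2 a < pvK2 b))
def pvBneg (a b : String) : Bool :=
  decide (-((PySem.Int.ofStr? a).getD 0) < -((PySem.Int.ofStr? b).getD 0))

lemma pv_insertBy_congr {α : Type} (b b' : α → α → Bool) (x : α) (ys : List α)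
    (h : ∀ y ∈ ys, b x y = b' x y) :
    PySem.List.insertBy b x ys = PySem.List.insertBy b' x ys := by
  induction ys with
  | nil => rfl
  | cons y ys ih =>
    simp only [PySem.List.insertBy, h y (List.mem_cons_self)]
    split
    · rfl
    · rw [ih (fun z hz => h z (List.mem_cons_of_mem _ hz))]

lemma pv_insertBy_append {α : Type} (b : α → α → Bool) (x : α) (D N : List α)
    (h : ∀ y ∈ N, b x y = true) :
    PySem.List.insertBy b x (D ++ N) = PySem.List.insertBy b x D ++ N := by
  induction D with
  | nil =>
    cases N with
    | nil => rfl
    | cons y ys => simp [PySem.List.insertBy, h y (List.mem_cons_self)]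
  | cons d D ih =>
    simp only [List.cons_append, PySem.List.insertBy]
    split
    · rfl
    · rw [ih, List.cons_append]

-- stable insertion sort with the tuple key splits into: digit keys sorted by -int,
-- then the non-digit keys in arrival order
lemma pv_sort_split (ys : List String) (D N : List String)
    (hD : ∀ y ∈ D, PySem.Str.strIsdigit y = true)
    (hN : ∀ y ∈ N, PySem.Str.strIsdigit y = false) :
    ys.foldl (fun acc x => PySem.List.insertBy pvB2 x acc) (D ++ N)
      = (ys.filter (fun y => PySem.Str.strIsdigit y)).foldl
          (fun acc x => PySem.List.insertBy pvBneg x acc) D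
        ++ N ++ ys.filter (fun y => !PySem.Str.strIsdigit y) := by
  induction ys generalizing D N with
  | nil => simp
  | cons x ys ih =>
    simp only [List.foldl_cons, List.filter_cons]
    cases hx : PySem.Str.strIsdigit x with
    | true =>
      simp only [Bool.not_true, reduceIte]
      rw [pv_insertBy_append pvB2 x D N
            (fun y hy => by
              simp only [pvB2, pvK1, pvK2, hx, hN y hy, reduceIte]; simp),
          pv_insertBy_congr pvB2 pvBneg x D
            (fun y hy => by
              simp only [pvB2, pvBneg, pvK1, pvK2, hx, hD y hy, reduceIte]; simp),
          ih (PySem.List.insertBy pvBneg x D) N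
            (fun y hy => by
              rcases (PySem.List.mem_insertBy pvBneg x y D).mp hy with h | h
              · exact h ▸ hx
              · exact hD y h)
            hN, List.foldl_cons]
      simp
    | false =>
      simp only [Bool.not_false, reduceIte]
      rw [PySem.List.insertBy_of_forall_not_before pvB2 x (D ++ N)
            (fun y hy => by
              rcases List.mem_append.mp hy with h | h
              · simp only [pvB2, pvK1, pvK2, hx, hD y h, reduceIte]; simp
              · simp only [pvB2, pvK1, pvK2, hx, hN y h]; simp),
          List.append_assoc,
          ih D (N ++ [x]) hD
            (fun y hy => by
              rcases List.mem_append.mp hy with h | h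
              · exact hN y h
              · simp only [List.mem_singleton] at h; exact h ▸ hx)]
      simp

-- A's bucket keys are exactly B's first-appearance set
lemma pv_keys (rows : List (List (String × String))) :
    (rows.foldl (fun b d => b.modify (pvYearKey d) [] (fun l => l ++ [d]))
        (PySem.Dict.empty : PySem.Dict String (List (List (String × String))))).keys
      = rows.foldl (fun s d => PySem.Set.add s (pvYearKey d)) [] := by
  rw [PySem.Dict.keys_foldl_modify_key rows pvYearKey [] (fun _ d => fun l => l ++ [d])]
  simp only [PySem.Dict.keys_empty, PySem.Set.update, ← List.foldl_map]

-- A's bucket content at any key is B's filter of the rows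
lemma pv_getD (rows : List (List (String × String))) (y : String) :
    (rows.foldl (fun b d => b.modify (pvYearKey d) [] (fun l => l ++ [d]))
        (PySem.Dict.empty : PySem.Dict String (List (List (String × String))))).getD y []
      = rows.filter (fun d => pvYearKey d == y) := by
  have h : rows.foldl (fun b d => b.modify (pvYearKey d) [] (fun l => l ++ [d]))
        (PySem.Dict.empty : PySem.Dict String (List (List (String × String))))
      = (rows.map (fun d => (pvYearKey d, d))).foldl
          (fun b p => b.modify p.1 [] (fun l => l ++ [p.2])) PySem.Dict.empty := by
    rw [List.foldl_map]
  rw [h, PySem.Dict.getD_foldl_modify_append, PySem.Dict.getD_empty, List.filter_map]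
  simp [Function.comp_def]

-- ===== VERDICT (by name: the statement is the Claim_ definition above) =====
theorem group_own_memories_by_year_py_spec : Claim_equal_group_own_memories_by_year_py := by
  intro rows _
  unfold Spec_group_own_memories_by_year_py
  simp only [group_own_memories_by_year_py, group_own_memories_by_year_py_alt]
  have hfun : (fun y => (y,
      (rows.foldl (fun b d => b.modify (pvYearKey d) [] (fun l => l ++ [d]))
        (PySem.Dict.empty : PySem.Dict String (List (List (String × String))))).getD y []))
      = (fun y => (y, rows.filter (fun d => pvYearKey d == y))) := by
    funext y; rw [pv_getD]
  rw [hfun, pv_keys]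
  have hsorted2 : PySem.List.sorted2
        (rows.foldl (fun s d => PySem.Set.add s (pvYearKey d)) [])
        (fun y => if PySem.Str.strIsdigit y then (0 : Int) else 1)
        (fun y => if PySem.Str.strIsdigit y then -((PySem.Int.ofStr? y).getD 0) else 0)
      = (rows.foldl (fun s d => PySem.Set.add s (pvYearKey d)) []).foldl
          (fun acc x => PySem.List.insertBy pvB2 x acc) [] := rfl
  have hsorted : PySem.List.sorted
        ((rows.foldl (fun s d => PySem.Set.add s (pvYearKey d)) []).filter
          (fun y => PySem.Str.strIsdigit y))
        (fun y => -((PySem.Int.ofStr? y).getD 0))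
      = ((rows.foldl (fun s d => PySem.Set.add s (pvYearKey d)) []).filter
          (fun y => PySem.Str.strIsdigit y)).foldl
          (fun acc x => PySem.List.insertBy pvBneg x acc) [] := rfl
  rw [hsorted2, hsorted]
  have := pv_sort_split (rows.foldl (fun s d => PySem.Set.add s (pvYearKey d)) []) [] []
    (by simp) (by simp)
  simp only [List.append_nil] at this
  rw [this]
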